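-- pv_equiv track=rewrite | github.com/nikunjpanchal22/code_clone_classification | python_t1_t2_full/Gpt_false_pair_3799.py | get_most_ooo_word
-- ===== SOURCE A (Python) =====
-- def get_most_ooo_word(lines) :
-- 	k = - 1
-- 	most_o = []
-- 	for line in lines :
-- 		phrase_words = line.split()
-- 		for word in phrase_words :
-- 			c = word.count('o')
-- 			if c > k :
-- 				k = c
-- 				most_o = [word]
-- 			elif c == k :
-- 				most_o.append(word)
-- 	return most_o
-- ===== SOURCE B (Python) =====
-- def get_most_ooo_word(lines):
--     words = [w for line in lines for w in line.split()]
--     if not words: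
--         return []
--     counts = [w.count('o') for w in words]
--     m = max(counts)
--     return [w for w, c in zip(words, counts) if c == m]
-- ===== Notes on version B (the rewrite author's own statement) =====
-- stated objective: simpler
-- what changed: B flattens all words first, computes the global maximum 'o'-count once with max(), then filters in a second pass, instead of A's single pass that maintains a running maximum and rebuilds the result list whenever the maximum increases.
import Mathlib
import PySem

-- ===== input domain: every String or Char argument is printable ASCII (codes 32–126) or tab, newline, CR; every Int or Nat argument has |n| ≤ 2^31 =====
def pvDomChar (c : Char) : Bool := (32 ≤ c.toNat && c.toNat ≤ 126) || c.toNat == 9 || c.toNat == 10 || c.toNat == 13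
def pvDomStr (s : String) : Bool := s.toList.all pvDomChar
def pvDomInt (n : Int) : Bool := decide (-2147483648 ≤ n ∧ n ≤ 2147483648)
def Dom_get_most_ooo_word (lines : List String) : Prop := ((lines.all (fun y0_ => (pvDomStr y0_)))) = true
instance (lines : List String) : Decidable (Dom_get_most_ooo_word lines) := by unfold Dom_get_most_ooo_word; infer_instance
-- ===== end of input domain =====

-- B flattens all words, takes the global maximum 'o'-count with max() once, then filters;
-- A keeps a running maximum and rebuilds the result list mid-pass. Same return value, proved below.


-- ===== PORT A =====
def pvStepA (st : Int × List String) (word : String) : Int × List String :=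
  let c : Int := (PySem.Str.count word "o" : Int)
  if c > st.1 then (c, [word])
  else if c = st.1 then (st.1, st.2 ++ [word])
  else st

def get_most_ooo_word (lines : List String) : List String :=
  (lines.foldl (fun st line => (PySem.Str.split₀ line).foldl pvStepA st) ((-1 : Int), ([] : List String))).2

-- ===== PORT B =====
def get_most_ooo_word_alt (lines : List String) : List String :=
  let words := lines.flatMap (fun line => PySem.Str.split₀ line)
  if words.isEmpty then []
  else
    let counts := words.map (fun w => (PySem.Str.count w "o" : Int))
    match PySem.List.max? counts (fun c => c) with
    | some m => ((words.zip counts).filter (fun wc => wc.2 == m)).map (fun wc => wc.1)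
    | none => []

-- ===== PRECONDITION & SPEC =====
def Spec_get_most_ooo_word (lines : List String) (out : List String) : Prop := out = get_most_ooo_word_alt lines
instance (lines : List String) (out : List String) : Decidable (Spec_get_most_ooo_word lines out) := by unfold Spec_get_most_ooo_word; infer_instance

-- ===== CLAIM (what is proved, stated in full; the proofs are below) =====
def Claim_equal_get_most_ooo_word : Prop := ∀ (lines : List String), Dom_get_most_ooo_word lines → Spec_get_most_ooo_word lines (get_most_ooo_word lines)

-- ===== LEMMAS AND PROOFS =====

def pvCnt (w : String) : Int := (PySem.Str.count w "o" : Int)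

def pvMax (ws : List String) (k : Int) : Int := ws.foldl (fun m w => max m (pvCnt w)) k

lemma pvMax_ge (ws : List String) (k : Int) : k ≤ pvMax ws k :=
  (PySem.List.le_foldl_max_int ws pvCnt k).1

-- folding A's per-line loops over all lines = folding A's step over the flattened word list
lemma foldA_flatten (lines : List String) (st : Int × List String) :
    lines.foldl (fun st line => (PySem.Str.split₀ line).foldl pvStepA st) st
      = (lines.flatMap (fun line => PySem.Str.split₀ line)).foldl pvStepA st := by
  induction lines generalizing st with
  | nil => rfl
  | cons l t ih => simp [List.foldl_append, ih]

-- the invariant of A's running-max loop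
lemma step_eq (st : Int × List String) (w : String) :
    pvStepA st w =
      if pvCnt w > st.1 then (pvCnt w, [w])
      else if pvCnt w = st.1 then (st.1, st.2 ++ [w]) else st := rfl

lemma foldA_eq (ws : List String) (k : Int) (acc : List String) :
    ws.foldl pvStepA (k, acc)
      = (pvMax ws k,
         (if pvMax ws k > k then [] else acc)
           ++ ws.filter (fun w => pvCnt w == pvMax ws k)) := by
  induction ws generalizing k acc with
  | nil => simp [pvMax]
  | cons w t ih =>
    have hstep : (w :: t).foldl pvStepA (k, acc) = t.foldl pvStepA (pvStepA (k, acc) w) := rfl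
    have hM : pvMax (w :: t) k = pvMax t (max k (pvCnt w)) := rfl
    rw [hstep, hM, step_eq]
    by_cases h1 : pvCnt w > k
    · rw [if_pos h1, ih]
      have hmax : max k (pvCnt w) = pvCnt w := by omega
      rw [hmax]
      have hge := pvMax_ge t (pvCnt w)
      rw [if_pos (show pvMax t (pvCnt w) > k by omega), List.filter_cons]
      by_cases h2 : pvCnt w = pvMax t (pvCnt w)
      · rw [if_neg (show ¬ pvMax t (pvCnt w) > pvCnt w by omega)]
        simp [← h2]
      · rw [if_pos (show pvMax t (pvCnt w) > pvCnt w by omega)]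
        simp [h2]
    · rw [if_neg (show ¬ pvCnt w > (k, acc).1 from h1)]
      have hmax : max k (pvCnt w) = k := by omega
      rw [hmax]
      have hge := pvMax_ge t k
      by_cases h2 : pvCnt w = k
      · rw [if_pos h2, ih, List.filter_cons]
        by_cases h3 : pvMax t k > k
        · rw [if_pos h3, if_pos h3,
            if_neg (show ¬ (pvCnt w == pvMax t k) = true by simp; omega)]
        · have hMk : pvMax t k = k := by omega
          rw [if_neg h3, if_neg h3,
            if_pos (show (pvCnt w == pvMax t k) = true by simp [h2, hMk])]
          simp
      · rw [if_neg h2, ih, List.filter_cons,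
          if_neg (show ¬ (pvCnt w == pvMax t k) = true by simp; omega)]

-- B's zip-filter-map is a plain filter on the word list
lemma zipFilter (ws : List String) (m : Int) :
    ((ws.zip (ws.map pvCnt)).filter (fun wc => wc.2 == m)).map (fun wc => wc.1)
      = ws.filter (fun w => pvCnt w == m) := by
  induction ws with
  | nil => rfl
  | cons w t ih =>
    simp only [List.map_cons, List.zip_cons_cons, List.filter_cons]
    by_cases h : pvCnt w == m
    · simp [h, ih]
    · simp [h, ih]

-- ===== VERDICT (by name: the statement is the Claim_ definition above) =====
theorem get_most_ooo_word_spec : Claim_equal_get_most_ooo_word := by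
  intro lines _
  unfold Spec_get_most_ooo_word get_most_ooo_word get_most_ooo_word_alt
  rw [foldA_flatten]
  match hws : lines.flatMap (fun line => PySem.Str.split₀ line) with
  | [] => simp
  | w :: t =>
    rw [foldA_eq]
    simp only [List.isEmpty_cons, List.map_cons, if_neg Bool.false_ne_true]
    rw [PySem.List.max?_id_cons]
    have hc0 : (0 : Int) ≤ pvCnt w := Int.natCast_nonneg _
    have hfm : (t.map (fun w => (PySem.Str.count w "o" : Int))).foldl max ((PySem.Str.count w "o" : Int))
        = pvMax (w :: t) (-1) := by
      have h1 : pvMax (w :: t) (-1) = pvMax t (max (-1) (pvCnt w)) := rfl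
      have h2 : max (-1 : Int) (pvCnt w) = pvCnt w := by omega
      rw [h1, h2, List.foldl_map]
      rfl
    rw [hfm]
    have hA0 : pvMax (w :: t) (-1) > -1 := by
      have := pvMax_ge t (pvCnt w)
      have h1 : pvMax (w :: t) (-1) = pvMax t (max (-1) (pvCnt w)) := rfl
      have h2 : max (-1 : Int) (pvCnt w) = pvCnt w := by omega
      rw [h1, h2]; omega
    rw [if_pos hA0, List.nil_append]
    exact (zipFilter (w :: t) (pvMax (w :: t) (-1))).symm
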